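-- pv_equiv track=rewrite | github.com/amineYaker/python-dsa | chapter4/PostfixTranslate.py | nextToken
-- ===== SOURCE A (Python) =====
-- operators = ["|", "&", "+-", "*/", "^","()"]
--
-- def precedence(operator: str) -> int: # Get the precedence of an operator
--     for p, ops in enumerate(operators):
--         if operator in ops:
--             return p + 1
--
-- def nextToken(s):
--     token = ""
--     s = s.strip()
--     if len(s) > 0:
--         if precedence(s[0]): # check if operator
--             token = s[0]
--             s = s[1:]
--         else:
--             while len(s) > 0 and not (precedence(s[0]) or s[0].isspace() ):
--                 token += s[0]
--                 s = s[1:]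
--     return token, s # return the token and remaining input
-- ===== SOURCE B (Python) =====
-- operators = ["|", "&", "+-", "*/", "^","()"]
-- _OPCHARS = "".join(operators)
--
-- def nextToken(s):
--     s = s.strip()
--     if not s:
--         return "", s
--     if s[0] in _OPCHARS:
--         return s[0], s[1:]
--     i = next((i for i, c in enumerate(s) if c in _OPCHARS or c.isspace()), len(s))
--     return s[:i], s[i:]
-- ===== Notes on version B (the rewrite author's own statement) =====
-- stated objective: faster
-- what changed: A grows the token one character at a time while re-slicing the remaining string each step; B scans once for the index of the first operator/whitespace delimiter and splits the stripped string with a single pair of slices.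
import Mathlib
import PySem

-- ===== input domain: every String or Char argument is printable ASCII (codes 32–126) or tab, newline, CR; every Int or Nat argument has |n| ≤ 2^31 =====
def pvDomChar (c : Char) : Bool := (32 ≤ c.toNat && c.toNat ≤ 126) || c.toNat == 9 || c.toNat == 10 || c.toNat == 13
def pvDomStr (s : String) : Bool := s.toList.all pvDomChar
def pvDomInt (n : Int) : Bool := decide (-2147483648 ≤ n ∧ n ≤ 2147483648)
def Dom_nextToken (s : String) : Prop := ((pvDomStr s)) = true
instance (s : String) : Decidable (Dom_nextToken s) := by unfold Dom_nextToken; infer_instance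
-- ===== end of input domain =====

-- B replaces A's character-by-character append-and-reslice loop by one scan for the index of
-- the first delimiter followed by a single take/drop split (alternative decomposition).

-- ===== PORT A =====
-- operators = ["|", "&", "+-", "*/", "^","()"]
def pvOperators : List String := ["|", "&", "+-", "*/", "^", "()"]

-- for p, ops in enumerate(operators): if operator in ops: return p + 1   (None when never found)
def pvPrecLoop (operator : String) : List (Int × String) → Option Int
  | [] => none
  | (p, ops) :: rest =>
      if PySem.Str.isIn operator ops then some (p + 1) else pvPrecLoop operator rest

def precedencePort (operator : String) : Option Int :=
  pvPrecLoop operator (PySem.List.enumerate pvOperators)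

-- Python truthiness of the Optional[int] that precedence returns (None and 0 are falsy)
def pvTruthy : Option Int → Bool
  | none => false
  | some v => v != 0

-- while len(s) > 0 and not (precedence(s[0]) or s[0].isspace()): token += s[0]; s = s[1:]
def nextTokenWhile (token : List Char) : List Char → List Char × List Char
  | [] => (token, [])
  | c :: rest =>
      if pvTruthy (precedencePort (String.ofList [c])) || PySem.Chars.isspace c then
        (token, c :: rest)
      else
        nextTokenWhile (token ++ [c]) rest

def nextToken (s : String) : String × String :=
  let cs := (PySem.Str.strip s).toList
  match cs with
  | [] => ("", String.ofList cs)
  | c :: rest =>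
      if pvTruthy (precedencePort (String.ofList [c])) then
        (String.ofList [c], String.ofList rest)
      else
        let tr := nextTokenWhile [] (c :: rest)
        (String.ofList tr.1, String.ofList tr.2)

-- ===== PORT B =====
-- _OPCHARS = "".join(operators)
def pvOpChars : List Char := "|&+-*/^()".toList

def pvIsDelim (c : Char) : Bool := pvOpChars.contains c || PySem.Chars.isspace c

-- i = next((i for i, c in enumerate(s) if c in _OPCHARS or c.isspace()), len(s))
def pvFindDelim : List Char → Nat
  | [] => 0
  | c :: rest => if pvIsDelim c then 0 else pvFindDelim rest + 1

def nextToken_alt (s : String) : String × String :=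
  let cs := (PySem.Str.strip s).toList
  match cs with
  | [] => ("", "")
  | c :: rest =>
      if pvOpChars.contains c then (String.ofList [c], String.ofList rest)
      else
        let i := pvFindDelim (c :: rest)
        (String.ofList ((c :: rest).take i), String.ofList ((c :: rest).drop i))

-- ===== PRECONDITION & SPEC =====
def Spec_nextToken (s : String) (out : String × String) : Prop := out = nextToken_alt s
instance (s : String) (out : String × String) : Decidable (Spec_nextToken s out) := by unfold Spec_nextToken; infer_instance

-- ===== CLAIM (what is proved, stated in full; the proofs are below) =====
def Claim_equal_nextToken : Prop := ∀ (s : String), Dom_nextToken s → Spec_nextToken s (nextToken s)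

-- ===== LEMMAS AND PROOFS =====

-- 'operator in ops' for a one-character operator is character membership
theorem isIn_single (c : Char) (l : List Char) :
    PySem.Chars.isIn [c] l = l.contains c := by
  by_cases h : c ∈ l
  · have t : PySem.Chars.isIn [c] l = true :=
      (PySem.Chars.isIn_iff_infix _ _).mpr ((List.singleton_infix_iff _ _).mpr h)
    simp [t, h]
  · have t : PySem.Chars.isIn [c] l = false :=
      (PySem.Chars.isIn_eq_false_iff _ _).mpr (by simpa [List.singleton_infix_iff] using h)
    simp [t, h]

-- A's operator test (truthiness of precedence) agrees with B's flat operator-character set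
theorem pvTruthy_prec (c : Char) :
    pvTruthy (precedencePort (String.ofList [c])) = pvOpChars.contains c := by
  have e : PySem.List.enumerate pvOperators = [(0,"|"),(1,"&"),(2,"+-"),(3,"*/"),(4,"^"),(5,"()")] := by decide
  have t1 : ("|" : String).toList = ['|'] := by decide
  have t2 : ("&" : String).toList = ['&'] := by decide
  have t3 : ("+-" : String).toList = ['+','-'] := by decide
  have t4 : ("*/" : String).toList = ['*','/'] := by decide
  have t5 : ("^" : String).toList = ['^'] := by decide
  have t6 : ("()" : String).toList = ['(',')'] := by decide
  have t0 : ("|&+-*/^()" : String).toList = ['|','&','+','-','*','/','^','(',')'] := by decide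
  simp only [precedencePort, e, pvPrecLoop, PySem.Str.isIn_eq, String.toList_ofList, isIn_single,
    t1, t2, t3, t4, t5, t6, pvOpChars, t0]
  split_ifs with h1 h2 h3 h4 h5 h6 <;> simp_all [pvTruthy] <;> tauto

-- A's while loop equals B's take/drop split at the first delimiter index
theorem nextTokenWhile_eq (cs token : List Char) :
    nextTokenWhile token cs =
      (token ++ cs.take (pvFindDelim cs), cs.drop (pvFindDelim cs)) := by
  induction cs generalizing token with
  | nil => simp [nextTokenWhile, pvFindDelim]
  | cons c rest ih =>
      by_cases h : pvIsDelim c = true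
      · have hc : (pvTruthy (precedencePort (String.ofList [c])) || PySem.Chars.isspace c) = true := by
          simpa [pvIsDelim, pvTruthy_prec] using h
        simp [nextTokenWhile, pvFindDelim, h, hc]
      · have hc : (pvTruthy (precedencePort (String.ofList [c])) || PySem.Chars.isspace c) = false := by
          simpa [pvIsDelim, pvTruthy_prec] using h
        simp [nextTokenWhile, pvFindDelim, h, hc, ih]

-- ===== VERDICT (by name: the statement is the Claim_ definition above) =====
theorem nextToken_spec : Claim_equal_nextToken := by
  intro s _
  unfold Spec_nextToken nextToken nextToken_alt
  cases hcs : (PySem.Str.strip s).toList with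
  | nil => simp
  | cons c rest =>
      simp only [pvTruthy_prec]
      by_cases h : c ∈ pvOpChars
      · simp [h]
      · simp [h, nextTokenWhile_eq]
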